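-- pv_equiv track=rewrite | github.com/Manohar-code3/some-python-files | trails/trial/3.py | fill_jug_with_cups
-- ===== SOURCE A (Python) =====
-- def fill_jug_with_cups(N, cups, L):
--     cups.sort(reverse=True)  # Sort cups in descending order to use larger cups first
--     frequencies = [0] * N
--     remaining_capacity = L
--
--     while remaining_capacity > 0:
--         used_cup = -1
--         max_distinct_cups = 0
--
--         for i in range(N):
--             if cups[i] <= remaining_capacity and frequencies[i] < cups.count(cups[i]):
--                 distinct_cups = len(set([cups[j] for j in range(N) if cups[j] <= remaining_capacity]))
--
--                 if distinct_cups > max_distinct_cups: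
--                     max_distinct_cups = distinct_cups
--                     used_cup = i
--
--         if used_cup == -1:
--             break  # No cup can be used further
--
--         remaining_capacity -= cups[used_cup]
--         frequencies[used_cup] += 1
--
--     return frequencies
-- ===== SOURCE B (Python) =====
-- def fill_jug_with_cups(N, cups, L):
--     # Pours the largest cup that still fits, one pour at a time, but finds it by
--     # binary search over the descending-sorted cups plus a skip over used-up
--     # positions, instead of a full rescan per pour.
--     # Note: like A, this sorts `cups` in place; the equivalence is about the return value.
--     cups.sort(reverse=True)
--     cap = {}
--     for v in cups:
--         cap[v] = cap.get(v, 0) + 1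
--     freq = [0] * N
--     remaining = L
--     while remaining > 0:
--         # first position whose cup fits the remaining capacity
--         lo, hi = 0, N
--         while lo < hi:
--             mid = (lo + hi) // 2
--             if cups[mid] > remaining:
--                 lo = mid + 1
--             else:
--                 hi = mid
--         # skip positions already used to their value's multiplicity
--         while lo < N and freq[lo] == cap[cups[lo]]:
--             lo += 1
--         if lo >= N:
--             break
--         freq[lo] += 1
--         remaining -= cups[lo]
--     return freq
-- ===== Notes on version B (the rewrite author's own statement) =====
-- stated objective: alternative
-- what changed: B precomputes each cup value's multiplicity once in a dict and finds every pour's cup by binary search over the descending-sorted list plus a skip over used-up positions, instead of A's per-pour full rescan that calls cups.count and rebuilds a distinct-value set at every candidate (a different selection mechanism of similar overall cost; a timing run did not confirm a speed-up); Pre_ only excludes the inputs where A raises IndexError (L > 0 with N > len(cups)), where B raises too.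
import Mathlib
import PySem

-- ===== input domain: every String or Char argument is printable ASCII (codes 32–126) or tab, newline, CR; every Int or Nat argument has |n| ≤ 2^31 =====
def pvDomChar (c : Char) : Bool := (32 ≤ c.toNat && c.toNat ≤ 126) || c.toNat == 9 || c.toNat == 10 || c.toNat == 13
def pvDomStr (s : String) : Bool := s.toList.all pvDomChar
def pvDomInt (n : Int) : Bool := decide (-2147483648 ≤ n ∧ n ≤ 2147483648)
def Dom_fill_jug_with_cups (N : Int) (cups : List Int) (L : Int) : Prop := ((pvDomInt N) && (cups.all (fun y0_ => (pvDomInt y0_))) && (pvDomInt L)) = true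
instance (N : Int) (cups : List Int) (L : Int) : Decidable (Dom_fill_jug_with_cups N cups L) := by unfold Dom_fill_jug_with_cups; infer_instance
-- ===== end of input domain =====

-- B finds each pour's cup by binary search over the descending-sorted list plus a skip over
-- exhausted positions (multiplicities precomputed once in a dict), instead of A's full rescan
-- with cups.count and a distinct-value set per pour (a different per-pour mechanism; alternative, not claimed faster).
-- Both Pythons sort `cups` in place (the same mutation); the equivalence proved here is about the return value.

-- ===== PORT A =====
-- A's inline expression 'len(set([cups[j] for j in range(N) if cups[j] <= remaining_capacity]))'
def fjwcA_distinct (cs : List Int) (N rem : Int) : Int :=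
  ((PySem.Set.ofList (((PySem.List.pyRange 0 N).filter
      (fun j => decide (PySem.List.pyGetD cs j 0 ≤ rem))).map
      (fun j => PySem.List.pyGetD cs j 0))).length : Int)

-- A's inner 'for i in range(N)' choosing (used_cup, max_distinct_cups)
def fjwcA_scan (cs freq : List Int) (N rem : Int) : Int × Int :=
  (PySem.List.pyRange 0 N).foldl (fun st i =>
    if PySem.List.pyGetD cs i 0 ≤ rem ∧
       PySem.List.pyGetD freq i 0 < (PySem.List.count cs (PySem.List.pyGetD cs i 0) : Int) then
      let distinct := fjwcA_distinct cs N rem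
      if distinct > st.2 then (i, distinct) else st
    else st) (-1, 0)

-- A's 'while remaining_capacity > 0' loop; fuel is one unit per pour, and the loop pours each
-- position at most count-many times, so cups.length^2 + 1 units are never exhausted.
def fjwcA_loop (cs : List Int) (N : Int) : Nat → Int → List Int → List Int
  | 0, _, freq => freq
  | fuel+1, rem, freq =>
    if rem > 0 then
      let used := (fjwcA_scan cs freq N rem).1
      if used = -1 then freq
      else fjwcA_loop cs N fuel (rem - PySem.List.pyGetD cs used 0)
             (PySem.List.pySetD freq used (PySem.List.pyGetD freq used 0 + 1))
    else freq

def fill_jug_with_cups (N : Int) (cups : List Int) (L : Int) : List Int :=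
  let cs := PySem.List.sorted cups (fun x => x) true
  let frequencies := PySem.List.pyRepeat [(0 : Int)] N
  fjwcA_loop cs N (cups.length * cups.length + 1) L frequencies

-- ===== PORT B =====
-- Source B's 'cap' dict of multiplicities
def fjwcB_cap (cs : List Int) : PySem.Dict Int Int :=
  cs.foldl (fun d v => d.insert v (d.getD v 0 + 1)) PySem.Dict.empty

-- Source B's inner 'while lo < hi' binary search
def fjwcB_bsearch (cs : List Int) (rem : Int) (lo hi : Int) : Int :=
  if _h : lo < hi then
    let mid := PySem.Int.floordiv (lo + hi) 2
    if PySem.List.pyGetD cs mid 0 > rem then fjwcB_bsearch cs rem (mid + 1) hi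
    else fjwcB_bsearch cs rem lo mid
  else lo
termination_by (hi - lo).toNat
decreasing_by
  · have h1 := PySem.Int.floordiv_two_mid_bounds (lo := lo) (hi := hi) (by omega)
    omega
  · have h1 := PySem.Int.floordiv_two_mid_bounds (lo := lo) (hi := hi) (by omega)
    have h2 : ¬ hi ≤ PySem.Int.floordiv (lo + hi) 2 := by
      intro hh
      have := (PySem.Int.le_floordiv_iff_mul_le (by norm_num : (0:Int) < 2)).mp hh
      omega
    omega

-- Source B's inner 'while lo < N and freq[lo] == cap[cups[lo]]' skip
def fjwcB_skip (cs freq : List Int) (cap : PySem.Dict Int Int) (N lo : Int) : Int :=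
  if _h : lo < N ∧
      PySem.List.pyGetD freq lo 0 = cap.getD (PySem.List.pyGetD cs lo 0) 0 then
    fjwcB_skip cs freq cap N (lo + 1)
  else lo
termination_by (N - lo).toNat
decreasing_by omega

-- Source B's 'while remaining > 0' loop (one pour per fuel unit, as in A's port)
def fjwcB_loop (cs : List Int) (cap : PySem.Dict Int Int) (N : Int) :
    Nat → Int → List Int → List Int
  | 0, _, freq => freq
  | fuel+1, rem, freq =>
    if rem > 0 then
      let pos := fjwcB_bsearch cs rem 0 N
      let i := fjwcB_skip cs freq cap N pos
      if i ≥ N then freq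
      else fjwcB_loop cs cap N fuel (rem - PySem.List.pyGetD cs i 0)
             (PySem.List.pySetD freq i (PySem.List.pyGetD freq i 0 + 1))
    else freq

def fill_jug_with_cups_alt (N : Int) (cups : List Int) (L : Int) : List Int :=
  let cs := PySem.List.sorted cups (fun x => x) true
  let cap := fjwcB_cap cs
  let freq := PySem.List.pyRepeat [(0 : Int)] N
  fjwcB_loop cs cap N (cups.length * cups.length + 1) L freq

-- ===== PRECONDITION & SPEC =====
-- Pre_ excludes exactly the inputs on which A raises IndexError: L > 0 with N > len(cups)
-- (there A's scan reads cups[i] for i ≥ len(cups)); B raises there too.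
def Pre_fill_jug_with_cups (N : Int) (cups : List Int) (L : Int) : Prop :=
  0 < L → N ≤ (cups.length : Int)
instance (N : Int) (cups : List Int) (L : Int) : Decidable (Pre_fill_jug_with_cups N cups L) := by
  unfold Pre_fill_jug_with_cups; infer_instance

def pvWitness_fill_jug_with_cups : Int × List Int × Int := (3, ([5, 3, 2], 10))

def Spec_fill_jug_with_cups (N : Int) (cups : List Int) (L : Int) (out : List Int) : Prop := out = fill_jug_with_cups_alt N cups L
instance (N : Int) (cups : List Int) (L : Int) (out : List Int) : Decidable (Spec_fill_jug_with_cups N cups L out) := by unfold Spec_fill_jug_with_cups; infer_instance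

-- ===== CLAIM (what is proved, stated in full; the proofs are below) =====
def Claim_equal_fill_jug_with_cups : Prop := ∀ (N : Int) (cups : List Int) (L : Int), Dom_fill_jug_with_cups N cups L → Pre_fill_jug_with_cups N cups L → Spec_fill_jug_with_cups N cups L (fill_jug_with_cups N cups L)

-- ===== LEMMAS AND PROOFS =====

-- the qualification condition both versions effectively test, at Nat index k
def fjwcQ (cs freq : List Int) (rem : Int) (k : Nat) : Bool :=
  decide (PySem.List.pyGetD cs (k : Int) 0 ≤ rem) &&
  decide (PySem.List.pyGetD freq (k : Int) 0 < (PySem.List.count cs (PySem.List.pyGetD cs (k : Int) 0) : Int))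

theorem fjwcQ_iff (cs freq : List Int) (rem : Int) (k : Nat) :
    fjwcQ cs freq rem k = true ↔
      (PySem.List.pyGetD cs (k : Int) 0 ≤ rem ∧
       PySem.List.pyGetD freq (k : Int) 0 < (PySem.List.count cs (PySem.List.pyGetD cs (k : Int) 0) : Int)) := by
  simp [fjwcQ]

-- first index in a list satisfying Q (proof-side reference for both searches)
def pfind (Q : Nat → Bool) : List Nat → Option Nat
  | [] => none
  | k :: t => if Q k then some k else pfind Q t

theorem pfind_range'_eq_some_iff (Q : Nat → Bool) (m : Nat) :
    ∀ (a i : Nat), (pfind Q (List.range' a m) = some i ↔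
      (a ≤ i ∧ i < a + m ∧ Q i = true ∧ ∀ j, a ≤ j → j < i → ¬ Q j = true)) := by
  induction m with
  | zero => intro a i; simp [pfind]; omega
  | succ m ih =>
    intro a i
    rw [List.range'_succ]
    simp only [pfind]
    split_ifs with h
    · constructor
      · rintro ⟨rfl⟩; exact ⟨le_refl _, by omega, h, fun j h1 h2 => by omega⟩
      · rintro ⟨h1, h2, h3, h4⟩
        by_cases hia : i = a
        · simp [hia]
        · exact absurd h (h4 a (le_refl _) (by omega))
    · rw [ih]
      constructor
      · rintro ⟨h1, h2, h3, h4⟩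
        exact ⟨by omega, by omega, h3, fun j hj1 hj2 => by
          by_cases hja : j = a
          · subst hja; exact h
          · exact h4 j (by omega) hj2⟩
      · rintro ⟨h1, h2, h3, h4⟩
        have hia : i ≠ a := by rintro rfl; exact h h3
        exact ⟨by omega, by omega, h3, fun j hj1 hj2 => h4 j (by omega) hj2⟩

theorem pfind_range_eq_some_iff (Q : Nat → Bool) (n i : Nat) :
    pfind Q (List.range n) = some i ↔ (i < n ∧ Q i = true ∧ ∀ j, j < i → ¬ Q j = true) := by
  rw [List.range_eq_range', pfind_range'_eq_some_iff]
  constructor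
  · rintro ⟨_, h2, h3, h4⟩; exact ⟨by omega, h3, fun j hj => h4 j (by omega) hj⟩
  · rintro ⟨h1, h2, h3⟩; exact ⟨by omega, by omega, h2, fun j _ hj => h3 j hj⟩

theorem pfind_range'_eq_none_iff (Q : Nat → Bool) (m : Nat) :
    ∀ (a : Nat), (pfind Q (List.range' a m) = none ↔ ∀ j, a ≤ j → j < a + m → ¬ Q j = true) := by
  induction m with
  | zero => intro a; simp [pfind]; omega
  | succ m ih =>
    intro a
    rw [List.range'_succ]
    simp only [pfind]
    split_ifs with h
    · simp only [false_iff]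
      push Not
      exact ⟨a, le_refl _, by omega, h⟩
    · rw [ih]
      constructor
      · intro hall j hj1 hj2
        by_cases hja : j = a
        · subst hja; exact h
        · exact hall j (by omega) (by omega)
      · intro hall j hj1 hj2
        exact hall j (by omega) (by omega)

theorem pfind_range_eq_none_iff (Q : Nat → Bool) (n : Nat) :
    pfind Q (List.range n) = none ↔ ∀ j, j < n → ¬ Q j = true := by
  rw [List.range_eq_range', pfind_range'_eq_none_iff]
  constructor
  · intro h j hj; exact h j (by omega) (by omega)
  · intro h j _ hj; exact h j (by omega)

-- A's distinct count is positive as soon as some in-range cup fits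
theorem fjwcA_distinct_pos (cs : List Int) (n : Nat) (rem : Int) (k : Nat)
    (hk : k < n) (hle : PySem.List.pyGetD cs (k : Int) 0 ≤ rem) :
    0 < fjwcA_distinct cs (n : Int) rem := by
  unfold fjwcA_distinct
  have hmem : PySem.List.pyGetD cs (k : Int) 0 ∈
      (((PySem.List.pyRange 0 (n : Int)).filter
      (fun j => decide (PySem.List.pyGetD cs j 0 ≤ rem))).map
      (fun j => PySem.List.pyGetD cs j 0)) := by
    apply List.mem_map_of_mem
    rw [List.mem_filter]
    refine ⟨?_, by simpa using hle⟩
    rw [PySem.List.pyRange_zero_natCast]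
    exact List.mem_map_of_mem (by simpa using hk)
  have h1 := (PySem.Set.mem_ofList _ _).mpr hmem
  have h2 := List.length_pos_iff.mpr (List.ne_nil_of_mem h1)
  exact_mod_cast h2

-- once (used, max_distinct) = (u, distinct), A's scan never changes it again
theorem fjwcA_scan_frozen (cs freq : List Int) (N rem : Int) (l : List Nat) (u : Int) :
    l.foldl (fun st (k : Nat) =>
      if PySem.List.pyGetD cs (k : Int) 0 ≤ rem ∧
         PySem.List.pyGetD freq (k : Int) 0 < (PySem.List.count cs (PySem.List.pyGetD cs (k : Int) 0) : Int) then
        if fjwcA_distinct cs N rem > st.2 then ((k : Int), fjwcA_distinct cs N rem) else st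
      else st) (u, fjwcA_distinct cs N rem) = (u, fjwcA_distinct cs N rem) := by
  induction l with
  | nil => rfl
  | cons k t ih =>
    simp only [List.foldl_cons]
    split_ifs with h1 h2
    · exact absurd h2 (lt_irrefl _)
    · exact ih
    · exact ih

-- A's scan returns the FIRST qualifying index (or -1)
theorem fjwcA_scan_eq (cs freq : List Int) (n : Nat) (rem : Int) :
    (fjwcA_scan cs freq (n : Int) rem).1 =
      (match pfind (fjwcQ cs freq rem) (List.range n) with
       | none => -1
       | some k => (k : Int)) := by
  unfold fjwcA_scan
  rw [PySem.List.pyRange_zero_natCast, List.foldl_map]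
  have aux : ∀ (l : List Nat), (∀ k ∈ l, k < n) →
      (l.foldl (fun (st : Int × Int) (k : Nat) =>
        if PySem.List.pyGetD cs (k : Int) 0 ≤ rem ∧
           PySem.List.pyGetD freq (k : Int) 0 < (PySem.List.count cs (PySem.List.pyGetD cs (k : Int) 0) : Int) then
          if fjwcA_distinct cs (n : Int) rem > st.2 then ((k : Int), fjwcA_distinct cs (n : Int) rem) else st
        else st) (-1, 0)).1 =
      (match pfind (fjwcQ cs freq rem) l with
       | none => -1
       | some k => (k : Int)) := by
    intro l hl
    induction l with
    | nil => rfl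
    | cons k t ih =>
      simp only [List.foldl_cons, pfind]
      by_cases hq : PySem.List.pyGetD cs (k : Int) 0 ≤ rem ∧
           PySem.List.pyGetD freq (k : Int) 0 < (PySem.List.count cs (PySem.List.pyGetD cs (k : Int) 0) : Int)
      · rw [if_pos hq, if_pos ((fjwcQ_iff cs freq rem k).mpr hq)]
        have hpos := fjwcA_distinct_pos cs n rem k (hl k (by simp)) hq.1
        rw [if_pos (by simpa using hpos)]
        rw [fjwcA_scan_frozen]
      · rw [if_neg hq, if_neg (fun hb => hq ((fjwcQ_iff cs freq rem k).mp hb))]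
        exact ih (fun k hk => hl k (by simp [hk]))
  exact aux _ (fun k hk => by simpa using List.mem_range.mp (by simpa using hk))

-- B's dict of multiplicities agrees with what A recomputes via cups.count
theorem fjwcB_cap_getD (cs : List Int) (v : Int) :
    (fjwcB_cap cs).getD v 0 = (PySem.List.count cs v : Int) := by
  unfold fjwcB_cap
  rw [PySem.Dict.getD_foldl_insert_add_one]
  simp [PySem.List.count]

-- B's binary search: its result r has every cup before it too large and every cup from it on fitting
theorem fjwcB_bsearch_spec (cs : List Int) (rem : Int) (n : Nat)
    (hsort : ∀ i j : Nat, i ≤ j → j < n →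
      PySem.List.pyGetD cs (j : Int) 0 ≤ PySem.List.pyGetD cs (i : Int) 0) :
    ∀ (d : Nat) (lo hi : Int), (hi - lo).toNat ≤ d → 0 ≤ lo → lo ≤ hi → hi ≤ (n : Int) →
    (∀ j : Nat, (j : Int) < lo → rem < PySem.List.pyGetD cs (j : Int) 0) →
    (∀ j : Nat, hi ≤ (j : Int) → j < n → PySem.List.pyGetD cs (j : Int) 0 ≤ rem) →
    ∃ r : Nat, fjwcB_bsearch cs rem lo hi = (r : Int) ∧ lo ≤ (r : Int) ∧ (r : Int) ≤ hi ∧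
      (∀ j : Nat, j < r → rem < PySem.List.pyGetD cs (j : Int) 0) ∧
      (∀ j : Nat, r ≤ j → j < n → PySem.List.pyGetD cs (j : Int) 0 ≤ rem) := by
  intro d
  induction d with
  | zero =>
    intro lo hi hd h0 hlh hhn hlow hhigh
    have hle : hi = lo := by omega
    subst hle
    rw [fjwcB_bsearch, dif_neg (by omega)]
    refine ⟨hi.toNat, by omega, by omega, by omega, ?_, ?_⟩
    · intro j hj; exact hlow j (by omega)
    · intro j hj1 hj2; exact hhigh j (by omega) hj2
  | succ d ih =>
    intro lo hi hd h0 hlh hhn hlow hhigh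
    rw [fjwcB_bsearch]
    by_cases hlt : lo < hi
    · rw [dif_pos hlt]
      have hmid := PySem.Int.floordiv_two_mid_bounds (lo := lo) (hi := hi) (by omega)
      have hmid2' : ¬ hi ≤ PySem.Int.floordiv (lo + hi) 2 := by
        intro hh
        have := (PySem.Int.le_floordiv_iff_mul_le (by norm_num : (0:Int) < 2)).mp hh
        omega
      set mid := PySem.Int.floordiv (lo + hi) 2 with hmiddef
      have hmid2 : mid < hi := by omega
      have hmn : mid.toNat < n := by omega
      have hmcast : mid = ((mid.toNat : Nat) : Int) := by omega
      by_cases hc : PySem.List.pyGetD cs mid 0 > rem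
      · rw [if_pos hc]
        have hlow' : ∀ j : Nat, (j : Int) < mid + 1 → rem < PySem.List.pyGetD cs (j : Int) 0 := by
          intro j hj
          by_cases hjlo : (j : Int) < lo
          · exact hlow j hjlo
          · have hjm : j ≤ mid.toNat := by omega
            have := hsort j mid.toNat hjm hmn
            rw [← hmcast] at this
            omega
        obtain ⟨r, h1, h2, h3, h4, h5⟩ := ih (mid + 1) hi (by omega) (by omega) (by omega) hhn hlow' hhigh
        exact ⟨r, h1, by omega, h3, h4, h5⟩
      · rw [if_neg hc]
        have hhigh' : ∀ j : Nat, mid ≤ (j : Int) → j < n → PySem.List.pyGetD cs (j : Int) 0 ≤ rem := by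
          intro j hj1 hj2
          have := hsort mid.toNat j (by omega) hj2
          rw [← hmcast] at this
          omega
        obtain ⟨r, h1, h2, h3, h4, h5⟩ := ih lo mid (by omega) h0 (by omega) (by omega) hlow hhigh'
        exact ⟨r, h1, h2, by omega, h4, h5⟩
    · rw [dif_neg hlt]
      refine ⟨lo.toNat, by omega, by omega, by omega, ?_, ?_⟩
      · intro j hj; exact hlow j (by omega)
      · intro j hj1 hj2; exact hhigh j (by omega) hj2

-- B's skip loop: the first position from lo on that is not used up (or N)
theorem fjwcB_skip_spec (cs freq : List Int) (cap : PySem.Dict Int Int) (n : Nat) :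
    ∀ (d : Nat) (lo : Int), ((n : Int) - lo).toNat ≤ d → 0 ≤ lo → lo ≤ (n : Int) →
    ∃ s : Nat, fjwcB_skip cs freq cap (n : Int) lo = (s : Int) ∧ lo ≤ (s : Int) ∧ s ≤ n ∧
      (∀ j : Nat, lo ≤ (j : Int) → j < s →
        PySem.List.pyGetD freq (j : Int) 0 = cap.getD (PySem.List.pyGetD cs (j : Int) 0) 0) ∧
      (s < n →
        PySem.List.pyGetD freq (s : Int) 0 ≠ cap.getD (PySem.List.pyGetD cs (s : Int) 0) 0) := by
  intro d
  induction d with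
  | zero =>
    intro lo hd h0 hln
    have : lo = (n : Int) := by omega
    subst this
    rw [fjwcB_skip, dif_neg (by omega)]
    exact ⟨n, by omega, by omega, by omega, fun j h1 h2 => by omega, fun h => absurd h (by omega)⟩
  | succ d ih =>
    intro lo hd h0 hln
    rw [fjwcB_skip]
    by_cases hc : lo < (n : Int) ∧
        PySem.List.pyGetD freq lo 0 = cap.getD (PySem.List.pyGetD cs lo 0) 0
    · rw [dif_pos hc]
      obtain ⟨s, h1, h2, h3, h4, h5⟩ := ih (lo + 1) (by omega) (by omega) (by omega)
      refine ⟨s, h1, by omega, h3, ?_, h5⟩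
      intro j hj1 hj2
      by_cases hje : (j : Int) = lo
      · rw [hje]; exact hc.2
      · exact h4 j (by omega) hj2
    · rw [dif_neg hc]
      refine ⟨lo.toNat, by omega, by omega, by omega, fun j h1 h2 => by omega, ?_⟩
      intro hsn
      have hlon : lo < (n : Int) := by omega
      have : lo = ((lo.toNat : Nat) : Int) := by omega
      intro heq
      exact hc ⟨hlon, by rw [this]; exact heq⟩

-- the central equivalence: one pour per fuel unit, identical choice and state in both loops
theorem fjwc_loop_eq (cs : List Int) (n : Nat)
    (hsort : ∀ i j : Nat, i ≤ j → j < n →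
      PySem.List.pyGetD cs (j : Int) 0 ≤ PySem.List.pyGetD cs (i : Int) 0) :
    ∀ (fuel : Nat) (rem : Int) (freq : List Int),
    (∀ k : Nat, k < n →
      PySem.List.pyGetD freq (k : Int) 0 ≤ (PySem.List.count cs (PySem.List.pyGetD cs (k : Int) 0) : Int)) →
    freq.length = n →
    fjwcA_loop cs (n : Int) fuel rem freq = fjwcB_loop cs (fjwcB_cap cs) (n : Int) fuel rem freq := by
  intro fuel
  induction fuel with
  | zero => intro rem freq _ _; rfl
  | succ fuel ih =>
    intro rem freq hinv hlen
    by_cases hrem : rem > 0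
    case neg =>
      simp only [fjwcA_loop, fjwcB_loop]
      rw [if_neg hrem, if_neg hrem]
    case pos =>
      simp only [fjwcA_loop, fjwcB_loop]
      rw [if_pos hrem, if_pos hrem]
      obtain ⟨r, hbs, hr1, hr2, hrlow, hrhigh⟩ :=
        fjwcB_bsearch_spec cs rem n hsort ((n : Int) - 0).toNat 0 (n : Int)
          (le_refl _) (by omega) (by omega) (by omega)
          (fun j hj => by omega) (fun j hj1 hj2 => by omega)
      rw [hbs]
      obtain ⟨s, hsk, hs1, hs2, hsall, hsstop⟩ :=
        fjwcB_skip_spec cs freq (fjwcB_cap cs) n ((n : Int) - (r : Int)).toNat (r : Int)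
          (le_refl _) (by omega) (by exact_mod_cast hr2)
      rw [hsk]
      -- every position before r fails Q (cup too large); from r on, Q ⟺ not used up
      have hnotQ_lt_r : ∀ j : Nat, j < r → ¬ fjwcQ cs freq rem j = true := by
        intro j hj hQ
        exact absurd ((fjwcQ_iff cs freq rem j).mp hQ).1 (by have := hrlow j hj; omega)
      have hQ_iff : ∀ j : Nat, r ≤ j → j < n →
          (fjwcQ cs freq rem j = true ↔
            PySem.List.pyGetD freq (j : Int) 0 ≠ (fjwcB_cap cs).getD (PySem.List.pyGetD cs (j : Int) 0) 0) := by
        intro j hj1 hj2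
        rw [fjwcQ_iff]
        have hle := hrhigh j hj1 hj2
        have hcap := fjwcB_cap_getD cs (PySem.List.pyGetD cs (j : Int) 0)
        have hin := hinv j hj2
        constructor
        · rintro ⟨_, h2⟩; rw [hcap]; omega
        · intro hne; exact ⟨hle, by rw [hcap] at hne; omega⟩
      rw [fjwcA_scan_eq cs freq n rem]
      cases hp : pfind (fjwcQ cs freq rem) (List.range n) with
      | none =>
        have hall := (pfind_range_eq_none_iff _ n).mp hp
        -- then the skip runs to n: s = n
        have hsn : s = n := by
          by_contra hne
          have hsn' : s < n := by omega
          have hQs : fjwcQ cs freq rem s = true := by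
            rw [hQ_iff s (by exact_mod_cast hs1) hsn']
            exact hsstop hsn'
          exact hall s hsn' hQs
        subst hsn
        simp
      | some i =>
        obtain ⟨hi_n, hQi, hmin⟩ := (pfind_range_eq_some_iff _ n i).mp hp
        -- the skip stops exactly at i
        have hri : r ≤ i := by
          by_contra h
          exact hnotQ_lt_r i (by omega) hQi
        have hsi : s = i := by
          have hs_le_i : (s : Int) ≤ (i : Int) := by
            by_contra h
            have hii : r ≤ i ∧ i < s := ⟨hri, by exact_mod_cast (by omega : (i : Int) < (s : Int))⟩
            have := hsall i (by exact_mod_cast hri) hii.2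
            have hQi' := (hQ_iff i hri hi_n).mp hQi
            exact hQi' this
          have hi_le_s : (i : Int) ≤ (s : Int) := by
            by_contra h
            have hsn' : s < n := by omega
            have hQs : fjwcQ cs freq rem s = true := by
              rw [hQ_iff s (by exact_mod_cast hs1) hsn']
              exact hsstop hsn'
            exact hmin s (by exact_mod_cast (by omega : (s : Int) < (i : Int))) hQs
          omega
        subst hsi
        simp only []
        rw [if_neg (by omega : ¬ ((s : Nat) : Int) = -1),
            if_neg (by omega : ¬ ((s : Nat) : Int) ≥ (n : Int))]
        apply ih
        · intro k hk
          have hklen : k < freq.length := by omega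
          have hget := PySem.List.pyGetD_pySetD_natCast freq s k
            (PySem.List.pyGetD freq (s : Int) 0 + 1) 0 (by omega)
          -- pyGetD_pySetD_natCast is stated with Nat-cast indices
          rw [hget]
          by_cases hks : k = s
          · rw [if_pos (by exact_mod_cast hks)]
            have := ((fjwcQ_iff cs freq rem s).mp hQi).2
            subst hks
            omega
          · rw [if_neg (by exact_mod_cast hks)]
            exact hinv k hk
        · rw [PySem.List.pySetD_natCast]; simpa using hlen

-- sortedness of the descending-sorted list, in pyGetD form
theorem fjwc_sorted_getD (cups : List Int) (n : Nat)
    (hn : n ≤ (PySem.List.sorted cups (fun x => x) true).length) :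
    ∀ i j : Nat, i ≤ j → j < n →
      PySem.List.pyGetD (PySem.List.sorted cups (fun x => x) true) (j : Int) 0 ≤
        PySem.List.pyGetD (PySem.List.sorted cups (fun x => x) true) (i : Int) 0 := by
  intro i j hij hj
  set cs := PySem.List.sorted cups (fun x => x) true with hcs
  have hjl : j < cs.length := by omega
  have hil : i < cs.length := by omega
  rw [PySem.List.pyGetD_natCast, PySem.List.pyGetD_natCast,
      List.getD_eq_getElem cs 0 hjl, List.getD_eq_getElem cs 0 hil]
  rcases Nat.eq_or_lt_of_le hij with rfl | hlt
  · exact le_refl _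
  · have hp := PySem.List.sorted_pairwise_rev (xs := cups) (key := fun x => x)
    rw [← hcs] at hp
    exact (List.pairwise_iff_getElem.mp hp) i j hil hjl hlt

-- ===== VERDICT (by name: the statement is the Claim_ definition above) =====
theorem fill_jug_with_cups_spec : Claim_equal_fill_jug_with_cups := by
  intro N cups L _hDom hPre
  unfold Spec_fill_jug_with_cups fill_jug_with_cups fill_jug_with_cups_alt
  simp only []
  by_cases hL : L > 0
  case neg =>
    -- both loops return the initial list untouched
    simp only [fjwcA_loop, fjwcB_loop]
    rw [if_neg hL, if_neg hL]
  case pos =>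
    have hN : N ≤ (cups.length : Int) := hPre hL
    by_cases hN0 : N ≤ 0
    · -- empty position range: A's scan yields -1, B's search yields 0 ≥ N; both stop at once
      simp only [fjwcA_loop, fjwcB_loop]
      rw [if_pos hL, if_pos hL]
      have hscan : (fjwcA_scan (PySem.List.sorted cups (fun x => x) true)
          (PySem.List.pyRepeat [(0 : Int)] N) N L).1 = -1 := by
        unfold fjwcA_scan
        have hr : PySem.List.pyRange 0 N = [] := by
          simp [PySem.List.pyRange]; omega
        rw [hr]; rfl
      have hbs : fjwcB_bsearch (PySem.List.sorted cups (fun x => x) true) L 0 N = 0 := by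
        rw [fjwcB_bsearch, dif_neg (by omega)]
      have hsk : fjwcB_skip (PySem.List.sorted cups (fun x => x) true)
          (PySem.List.pyRepeat [(0 : Int)] N) (fjwcB_cap (PySem.List.sorted cups (fun x => x) true)) N 0 = 0 := by
        rw [fjwcB_skip, dif_neg (by intro h; omega)]
      rw [hscan, hbs, hsk]
      rw [if_pos rfl, if_pos (by omega : (0 : Int) ≥ N)]
    · have hn : N = (N.toNat : Int) := (Int.toNat_of_nonneg (by omega)).symm
      have hlencs : (PySem.List.sorted cups (fun x => x) true).length = cups.length :=
        (PySem.List.sorted_perm cups (fun x => x) true).length_eq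
      have hrep : PySem.List.pyRepeat [(0 : Int)] N = List.replicate N.toNat (0 : Int) :=
        PySem.List.pyRepeat_singleton _ _
      rw [hrep, hn]
      apply fjwc_loop_eq (PySem.List.sorted cups (fun x => x) true) N.toNat
        (fjwc_sorted_getD cups N.toNat (by omega))
      · intro k hk
        rw [Int.toNat_natCast]
        have h0 : PySem.List.pyGetD (List.replicate N.toNat (0 : Int)) (k : Int) 0 = 0 := by
          rw [PySem.List.pyGetD_natCast]
          rw [List.getD_eq_getElem _ _ (by simpa using hk)]
          simp
        rw [h0]
        exact_mod_cast Nat.zero_le _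
      · simp
        omega
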